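-- pv_equiv track=rewrite | github.com/moaazalqady/SL3_Webs | main.py | standardize_rows
-- ===== SOURCE A (Python) =====
-- def standardize_rows(r1, r2, r3, L):
--     """Explodes duplicate labels into a standard 1..3n permutation."""
--     pos_dict = {i: [] for i in range(1, L + 1)}
--     for c, val in enumerate(r1): pos_dict[val].append((0, c))
--     for c, val in enumerate(r2): pos_dict[val].append((1, c))
--     for c, val in enumerate(r3): pos_dict[val].append((2, c))
--
--     p = 1
--     ST = [[0] * len(r1), [0] * len(r2), [0] * len(r3)]
--     for v in range(1, L + 1):
--         # Sort top-row first to ensure smaller indices map to higher arcs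
--         coords = sorted(pos_dict[v], key=lambda x: x[0])
--         for r, c in coords:
--             ST[r][c] = p
--             p += 1
--     return ST[0], ST[1], ST[2]
-- ===== SOURCE B (Python) =====
-- def standardize_rows(r1, r2, r3, L):
--     """Closed-rank relabeling: count each label once into a table keyed over
--     range(1, L+1), turn it into a prefix-offset (starting-number) table, then
--     assign labels in a single row-major pass."""
--     rows = (r1, r2, r3)
--     cnt = {i: 0 for i in range(1, L + 1)}
--     for row in rows:
--         for v in row:
--             cnt[v] += 1
--     less = {}
--     acc = 0
--     for v in cnt:
--         less[v] = acc
--         acc += cnt[v]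
--     seen = {}
--     out = []
--     for row in rows:
--         cur = []
--         for v in row:
--             s = seen.get(v, 0)
--             cur.append(1 + less[v] + s)
--             seen[v] = s + 1
--         out.append(cur)
--     return out[0], out[1], out[2]
-- ===== Notes on version B (the rewrite author's own statement) =====
-- stated objective: alternative
-- what changed: Replaced A's per-label bucket dict of coordinate lists (built per cell, then sorted and swept once per label v in range(1,L+1) to relabel) by a plain occurrence counter keyed over range(1,L+1), a prefix-offset (starting-number) table derived from it in one accumulation pass, and a single row-major assignment pass with a seen-counter; B never stores coordinates and never revisits the grid per label.
import Mathlib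
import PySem

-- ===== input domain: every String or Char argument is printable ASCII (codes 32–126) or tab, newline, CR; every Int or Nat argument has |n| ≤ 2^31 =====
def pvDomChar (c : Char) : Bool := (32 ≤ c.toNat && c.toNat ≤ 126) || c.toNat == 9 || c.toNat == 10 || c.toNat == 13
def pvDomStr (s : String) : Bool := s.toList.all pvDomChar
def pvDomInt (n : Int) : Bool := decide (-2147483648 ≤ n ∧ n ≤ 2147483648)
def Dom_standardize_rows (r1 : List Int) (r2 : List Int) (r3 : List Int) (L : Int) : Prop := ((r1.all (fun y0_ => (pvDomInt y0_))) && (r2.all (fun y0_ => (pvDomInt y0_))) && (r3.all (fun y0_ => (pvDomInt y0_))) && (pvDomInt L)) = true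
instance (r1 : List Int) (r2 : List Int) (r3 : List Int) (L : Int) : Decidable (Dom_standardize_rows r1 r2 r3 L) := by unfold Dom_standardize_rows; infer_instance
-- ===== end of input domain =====

-- B replaces A's per-label bucket dict of coordinate lists + per-label relabeling
-- sweep by an occurrence counter over range(1, L+1), a prefix-offset table, and one
-- row-major assignment pass (alternative algorithm, no coordinate lists).

-- ===== PORT A =====
-- pos_dict = {i: [] for i in range(1, L + 1)}
def aInit (L : Int) : PySem.Dict Int (List (Int × Int)) :=
  (PySem.List.pyRange 1 (L + 1) 1).foldl (fun d i => d.insert i []) PySem.Dict.empty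

-- for c, val in enumerate(row): pos_dict[val].append((R, c)) — one helper used for
-- the three identical loops. Python raises KeyError on a missing key; Dict.modify's
-- default branch is only reachable outside Pre_standardize_rows (exact under it).
def aAdd (R : Int) (row : List Int) (d : PySem.Dict Int (List (Int × Int))) :
    PySem.Dict Int (List (Int × Int)) :=
  (PySem.List.enumerate row 0).foldl
    (fun d cv => d.modify cv.2 [] (fun l => l ++ [(R, cv.1)])) d

-- body of the 'for v in range(1, L + 1)' loop
def aStep (d : PySem.Dict Int (List (Int × Int))) (acc : List (List Int) × Int) (v : Int) :
    List (List Int) × Int :=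
  (PySem.List.sorted (d.getD v []) (fun x => x.1) false).foldl
    (fun acc rc =>
      (PySem.List.pySetD acc.1 rc.1
         (PySem.List.pySetD (PySem.List.pyGetD acc.1 rc.1 []) rc.2 acc.2),
       acc.2 + 1))
    acc

def standardize_rows (r1 : List Int) (r2 : List Int) (r3 : List Int) (L : Int) :
    List Int × List Int × List Int :=
  let d := aAdd 2 r3 (aAdd 1 r2 (aAdd 0 r1 (aInit L)))
  let res := (PySem.List.pyRange 1 (L + 1) 1).foldl (aStep d)
    ([PySem.List.pyRepeat [(0 : Int)] (r1.length : Int),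
      PySem.List.pyRepeat [(0 : Int)] (r2.length : Int),
      PySem.List.pyRepeat [(0 : Int)] (r3.length : Int)], 1)
  (PySem.List.pyGetD res.1 0 [], PySem.List.pyGetD res.1 1 [], PySem.List.pyGetD res.1 2 [])

-- ===== PORT B =====
-- cnt = {i: 0 for i in range(1, L + 1)}
def bSeed (L : Int) : PySem.Dict Int Int :=
  (PySem.List.pyRange 1 (L + 1) 1).foldl (fun d i => d.insert i 0) PySem.Dict.empty

-- cnt[v] += 1 — Python raises KeyError on a label outside range(1, L+1); the
-- getD default below is only reachable outside Pre_standardize_rows (exact under it).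
def bCnt (rows : List (List Int)) (L : Int) : PySem.Dict Int Int :=
  rows.foldl (fun d row => row.foldl (fun d v => d.insert v (d.getD v 0 + 1)) d) (bSeed L)

-- for v in cnt: less[v] = acc; acc += cnt[v]
def bLess (cnt : PySem.Dict Int Int) : PySem.Dict Int Int :=
  (cnt.keys.foldl
    (fun (st : PySem.Dict Int Int × Int) v => (st.1.insert v st.2, st.2 + cnt.getD v 0))
    (PySem.Dict.empty, 0)).1

-- s = seen.get(v, 0); cur.append(1 + less[v] + s); seen[v] = s + 1
-- (less[v] raises only on labels outside range(1, L+1), excluded by Pre_standardize_rows)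
def bRow (less : PySem.Dict Int Int) (seen : PySem.Dict Int Int) (row : List Int) :
    PySem.Dict Int Int × List Int :=
  row.foldl
    (fun (st2 : PySem.Dict Int Int × List Int) v =>
      (st2.1.insert v (st2.1.getD v 0 + 1), st2.2 ++ [1 + less.getD v 0 + st2.1.getD v 0]))
    (seen, [])

def standardize_rows_alt (r1 : List Int) (r2 : List Int) (r3 : List Int) (L : Int) :
    List Int × List Int × List Int :=
  let rows : List (List Int) := [r1, r2, r3]
  let cnt := bCnt rows L
  let less := bLess cnt
  let fin := rows.foldl
    (fun (st : PySem.Dict Int Int × List (List Int)) row =>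
      let rr := bRow less st.1 row
      (rr.1, st.2 ++ [rr.2]))
    (PySem.Dict.empty, [])
  (PySem.List.pyGetD fin.2 0 [], PySem.List.pyGetD fin.2 1 [], PySem.List.pyGetD fin.2 2 [])

-- ===== PRECONDITION & SPEC =====
-- Pre_ excludes exactly the inputs where A raises KeyError: some label outside range(1, L+1).
def Pre_standardize_rows (r1 : List Int) (r2 : List Int) (r3 : List Int) (L : Int) : Prop :=
  ∀ x ∈ r1 ++ r2 ++ r3, 1 ≤ x ∧ x ≤ L
instance (r1 : List Int) (r2 : List Int) (r3 : List Int) (L : Int) :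
    Decidable (Pre_standardize_rows r1 r2 r3 L) := by
  unfold Pre_standardize_rows; infer_instance

def pvWitness_standardize_rows : List Int × List Int × List Int × Int :=
  ([1, 2, 1], [3, 2, 3], [1, 2, 3], 3)

def Spec_standardize_rows (r1 : List Int) (r2 : List Int) (r3 : List Int) (L : Int)
    (out : List Int × List Int × List Int) : Prop :=
  out = standardize_rows_alt r1 r2 r3 L
instance (r1 : List Int) (r2 : List Int) (r3 : List Int) (L : Int)
    (out : List Int × List Int × List Int) : Decidable (Spec_standardize_rows r1 r2 r3 L out) := by
  unfold Spec_standardize_rows; infer_instance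

-- ===== CLAIM (what is proved, stated in full; the proofs are below) =====
def Claim_equal_standardize_rows : Prop := ∀ (r1 : List Int) (r2 : List Int) (r3 : List Int) (L : Int), Dom_standardize_rows r1 r2 r3 L → Pre_standardize_rows r1 r2 r3 L → Spec_standardize_rows r1 r2 r3 L (standardize_rows r1 r2 r3 L)


-- ===== LEMMAS AND PROOFS =====

-- the final label of the cell holding x, whose strict row-major prefix is pre,
-- in a grid whose multiset of labels is all:
def rankVal (all pre : List Int) (x : Int) : Int :=
  1 + (all.countP (fun y => decide (y < x)) : Int) + (pre.count x : Int)

def rankRow (all : List Int) (pre : List Int) : List Int → List Int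
  | [] => []
  | x :: t => rankVal all pre x :: rankRow all (pre ++ [x]) t

-- grid row after A has processed the labels 1..v-1 (cells with label < v filled)
def fillRow (all : List Int) (v : Int) (pre : List Int) : List Int → List Int
  | [] => []
  | x :: t => (if x < v then rankVal all pre x else 0) :: fillRow all v (pre ++ [x]) t

def part (R : Int) (row : List Int) (v : Int) : List (Int × Int) :=
  ((PySem.List.enumerate row 0).filter (fun cv => cv.2 == v)).map (fun cv => (R, cv.1))

def posList (v : Int) (row : List Int) (s : Int) : List Int :=
  ((PySem.List.enumerate row s).filter (fun cv => cv.2 == v)).map (fun cv => cv.1)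

def rowStep (st : List Int × Int) (c : Int) : List Int × Int :=
  (PySem.List.pySetD st.1 c st.2, st.2 + 1)

def innerStep (acc : List (List Int) × Int) (rc : Int × Int) : List (List Int) × Int :=
  (PySem.List.pySetD acc.1 rc.1
     (PySem.List.pySetD (PySem.List.pyGetD acc.1 rc.1 []) rc.2 acc.2),
   acc.2 + 1)

-- A's loop state after the labels < v have been processed
def stateF (r1 r2 r3 : List Int) (v : Int) : List (List Int) × Int :=
  ([fillRow (r1 ++ r2 ++ r3) v [] r1,
    fillRow (r1 ++ r2 ++ r3) v r1 r2,
    fillRow (r1 ++ r2 ++ r3) v (r1 ++ r2) r3],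
   1 + ((r1 ++ r2 ++ r3).countP (fun y => decide (y < v)) : Int))

-- ---- A side: characterizing the dict ----
lemma getD_foldl_insert_nil (l : List Int) :
    ∀ (d : PySem.Dict Int (List (Int × Int))) (v : Int), d.getD v [] = [] →
      ((l.foldl (fun d i => d.insert i []) d).getD v [] = []) := by
  induction l with
  | nil => intro d v h; simpa using h
  | cons i t ih =>
    intro d v h
    simp only [List.foldl_cons]
    exact ih _ v (by rw [PySem.Dict.getD_insert]; split <;> simp [h])

lemma getD_aInit (L v : Int) : (aInit L).getD v [] = [] := by
  exact getD_foldl_insert_nil _ _ v (PySem.Dict.getD_empty v [])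

lemma getD_aAdd (R : Int) (row : List Int) (d : PySem.Dict Int (List (Int × Int))) (v : Int) :
    (aAdd R row d).getD v [] = d.getD v [] ++ part R row v := by
  have h1 : aAdd R row d = ((PySem.List.enumerate row 0).map (fun cv => (cv.2, (R, cv.1)))).foldl
      (fun d p => d.modify p.1 [] (fun l => l ++ [p.2])) d := by
    rw [List.foldl_map]; rfl
  rw [h1, PySem.Dict.getD_foldl_modify_append]
  congr 1
  rw [List.filter_map, List.map_map]
  rfl

lemma getD_aDict (r1 r2 r3 : List Int) (L v : Int) :
    (aAdd 2 r3 (aAdd 1 r2 (aAdd 0 r1 (aInit L)))).getD v [] =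
      part 0 r1 v ++ part 1 r2 v ++ part 2 r3 v := by
  rw [getD_aAdd, getD_aAdd, getD_aAdd, getD_aInit]
  simp [List.append_assoc]

lemma fst_mem_part (R : Int) (row : List Int) (v : Int) (q : Int × Int) (hq : q ∈ part R row v) :
    q.1 = R := by
  simp only [part, List.mem_map] at hq
  obtain ⟨cv, -, rfl⟩ := hq
  rfl

lemma sorted_parts (r1 r2 r3 : List Int) (v : Int) :
    PySem.List.sorted (part 0 r1 v ++ part 1 r2 v ++ part 2 r3 v) (fun x => x.1) false =
      part 0 r1 v ++ part 1 r2 v ++ part 2 r3 v := by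
  apply PySem.List.sorted_eq_self_of_pairwise
  have h0 := fst_mem_part 0 r1 v
  have h1 := fst_mem_part 1 r2 v
  have h2 := fst_mem_part 2 r3 v
  rw [List.pairwise_append, List.pairwise_append]
  refine ⟨⟨List.pairwise_of_forall_mem_list ?_, List.pairwise_of_forall_mem_list ?_, ?_⟩,
    List.pairwise_of_forall_mem_list ?_, ?_⟩ <;>
    intro a ha b hb <;> first
      | (rw [h0 a ha, h1 b hb]; norm_num)
      | skip
  · rw [h0 a ha, h0 b hb]
  · rw [h1 a ha, h1 b hb]
  · rw [h2 a ha, h2 b hb]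
  · rcases List.mem_append.1 ha with ha' | ha'
    · rw [h0 a ha', h2 b hb]; norm_num
    · rw [h1 a ha', h2 b hb]; norm_num

-- ---- A side: the scatter pass over one row ----
lemma posList_cons (v x : Int) (t : List Int) (s : Int) :
    posList v (x :: t) s =
      (if x = v then [s] else []) ++ posList v t (s + 1) := by
  simp only [posList, PySem.List.enumerate_cons, List.filter_cons]
  by_cases h : x = v <;> simp [h]

lemma scatter (v : Int) : ∀ (l : List Int) (s : Nat) (a : List Int) (p : Int),
    s + l.length ≤ a.length →
    (((posList v l (s : Int)).foldl rowStep (a, p)).1.length = a.length ∧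
     ((posList v l (s : Int)).foldl rowStep (a, p)).2 = p + (l.count v : Int) ∧
     ∀ j : Nat, (((posList v l (s : Int)).foldl rowStep (a, p)).1)[j]? =
       if s ≤ j ∧ l[j - s]? = some v then some (p + ((l.take (j - s)).count v : Int))
       else a[j]?) := by
  intro l
  induction l with
  | nil =>
    intro s a p _
    refine ⟨rfl, by simp [posList, PySem.List.enumerate], ?_⟩
    intro j
    rw [if_neg]
    · rfl
    · rintro ⟨-, h2⟩; simp at h2
  | cons x t ih =>
    intro s a p hlen
    have hsa : s < a.length := by simp at hlen; omega
    have hcast : (s : Int) + 1 = ((s + 1 : Nat) : Int) := by push_cast; ring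
    by_cases hx : x = v
    · subst hx
      rw [posList_cons]
      simp only [eq_self_iff_true, if_true, List.singleton_append, List.foldl_cons]
      rw [show rowStep (a, p) (s : Int) = (a.set s p, p + 1) from by
        simp [rowStep, PySem.List.pySetD_natCast]]
      rw [hcast]
      obtain ⟨ih1, ih2, ih3⟩ := ih (s + 1) (a.set s p) (p + 1)
        (by simp at hlen ⊢; omega)
      refine ⟨by rw [ih1]; simp, by rw [ih2]; simp [List.count_cons]; push_cast; ring, ?_⟩
      intro j
      rw [ih3 j]
      rcases Nat.lt_trichotomy j s with hj | hj | hj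
      · rw [if_neg (by omega), if_neg (by omega), List.getElem?_set_ne (by omega)]
      · subst hj
        rw [if_neg (by omega), if_pos ⟨le_refl _, by simp⟩]
        rw [List.getElem?_set_self hsa]
        simp
      · have h1 : j - s = (j - (s + 1)) + 1 := by omega
        by_cases hc : t[j - (s + 1)]? = some x
        · rw [if_pos ⟨by omega, hc⟩, if_pos ⟨by omega, by rw [h1]; simpa using hc⟩]
          rw [h1]
          simp
          push_cast; ring
        · rw [if_neg (by rintro ⟨-, h⟩; exact hc h),
              if_neg (by rintro ⟨-, h⟩; rw [h1] at h; simp at h; exact hc h)]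
          rw [List.getElem?_set_ne (by omega)]
    · rw [posList_cons]
      simp only [if_neg hx, List.nil_append]
      rw [hcast]
      obtain ⟨ih1, ih2, ih3⟩ := ih (s + 1) a p (by simp at hlen ⊢; omega)
      refine ⟨ih1, by rw [ih2]; simp [List.count_cons, hx], ?_⟩
      intro j
      rw [ih3 j]
      rcases Nat.lt_trichotomy j s with hj | hj | hj
      · rw [if_neg (by omega), if_neg (by omega)]
      · subst hj
        rw [if_neg (by omega),
            if_neg (by rintro ⟨-, h⟩; simp at h; first | exact hx h | exact hx h.symm)]
      · have h1 : j - s = (j - (s + 1)) + 1 := by omega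
        by_cases hc : t[j - (s + 1)]? = some v
        · rw [if_pos ⟨by omega, hc⟩, if_pos ⟨by omega, by rw [h1]; simpa using hc⟩]
          rw [h1]
          simp [List.count_cons, hx]
        · rw [if_neg (by rintro ⟨-, h⟩; exact hc h),
              if_neg (by rintro ⟨-, h⟩; rw [h1] at h; simp at h; exact hc h)]

lemma bridge0 : ∀ (ps : List (Int × Int)), (∀ q ∈ ps, q.1 = (0 : Int)) →
    ∀ (a b c : List Int) (p : Int),
    ps.foldl innerStep ([a, b, c], p) =
      ([((ps.map (fun q => q.2)).foldl rowStep (a, p)).1, b, c],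
       ((ps.map (fun q => q.2)).foldl rowStep (a, p)).2) := by
  intro ps
  induction ps with
  | nil => intro _ a b c p; rfl
  | cons q t ih =>
    intro hps a b c p
    obtain ⟨r, cc⟩ := q
    have hr : r = 0 := hps (r, cc) (List.mem_cons_self)
    subst hr
    simp only [List.foldl_cons, List.map_cons]
    rw [show innerStep ([a, b, c], p) (0, cc) = ([PySem.List.pySetD a cc p, b, c], p + 1) from rfl]
    rw [show rowStep (a, p) cc = (PySem.List.pySetD a cc p, p + 1) from rfl]
    exact ih (fun q hq => hps q (List.mem_cons_of_mem _ hq)) _ b c _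

lemma bridge1 : ∀ (ps : List (Int × Int)), (∀ q ∈ ps, q.1 = (1 : Int)) →
    ∀ (a b c : List Int) (p : Int),
    ps.foldl innerStep ([a, b, c], p) =
      ([a, ((ps.map (fun q => q.2)).foldl rowStep (b, p)).1, c],
       ((ps.map (fun q => q.2)).foldl rowStep (b, p)).2) := by
  intro ps
  induction ps with
  | nil => intro _ a b c p; rfl
  | cons q t ih =>
    intro hps a b c p
    obtain ⟨r, cc⟩ := q
    have hr : r = 1 := hps (r, cc) (List.mem_cons_self)
    subst hr
    simp only [List.foldl_cons, List.map_cons]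
    rw [show innerStep ([a, b, c], p) (1, cc) = ([a, PySem.List.pySetD b cc p, c], p + 1) from rfl]
    rw [show rowStep (b, p) cc = (PySem.List.pySetD b cc p, p + 1) from rfl]
    exact ih (fun q hq => hps q (List.mem_cons_of_mem _ hq)) a _ c _

lemma bridge2 : ∀ (ps : List (Int × Int)), (∀ q ∈ ps, q.1 = (2 : Int)) →
    ∀ (a b c : List Int) (p : Int),
    ps.foldl innerStep ([a, b, c], p) =
      ([a, b, ((ps.map (fun q => q.2)).foldl rowStep (c, p)).1],
       ((ps.map (fun q => q.2)).foldl rowStep (c, p)).2) := by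
  intro ps
  induction ps with
  | nil => intro _ a b c p; rfl
  | cons q t ih =>
    intro hps a b c p
    obtain ⟨r, cc⟩ := q
    have hr : r = 2 := hps (r, cc) (List.mem_cons_self)
    subst hr
    simp only [List.foldl_cons, List.map_cons]
    rw [show innerStep ([a, b, c], p) (2, cc) = ([a, b, PySem.List.pySetD c cc p], p + 1) from rfl]
    rw [show rowStep (c, p) cc = (PySem.List.pySetD c cc p, p + 1) from rfl]
    exact ih (fun q hq => hps q (List.mem_cons_of_mem _ hq)) a b _ _

lemma map_snd_part (R : Int) (row : List Int) (v : Int) :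
    (part R row v).map (fun q => q.2) = posList v row 0 := by
  simp only [part, posList, List.map_map]
  rfl

-- ---- helper count facts ----
lemma countP_lt_succ (l : List Int) (v : Int) :
    l.countP (fun y => decide (y < v + 1)) = l.countP (fun y => decide (y < v)) + l.count v := by
  induction l with
  | nil => rfl
  | cons x t ih =>
    simp only [List.countP_cons, List.count_cons, ih]
    by_cases h1 : x < v + 1 <;> by_cases h2 : x < v <;> by_cases h3 : x = v <;>
      simp [h1, h2, h3] <;> omega

lemma fillRow_getElem? (all : List Int) (v : Int) :
    ∀ (row pre : List Int) (j : Nat),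
      (fillRow all v pre row)[j]? =
        (row[j]?).map (fun x => if x < v then rankVal all (pre ++ row.take j) x else 0) := by
  intro row
  induction row with
  | nil => intro pre j; simp [fillRow]
  | cons x t ih =>
    intro pre j
    cases j with
    | zero => simp [fillRow]
    | succ j =>
      simp only [fillRow, List.getElem?_cons_succ, List.take_succ_cons]
      rw [ih]
      simp [List.append_assoc]

lemma length_fillRow (all : List Int) (v : Int) :
    ∀ (row pre : List Int), (fillRow all v pre row).length = row.length := by
  intro row
  induction row with
  | nil => intro pre; rfl
  | cons x t ih => intro pre; simp [fillRow, ih]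

lemma fillRow_of_ge (all : List Int) (v : Int) :
    ∀ (row pre : List Int), (∀ x ∈ row, ¬ x < v) →
      fillRow all v pre row = List.replicate row.length 0 := by
  intro row
  induction row with
  | nil => intro pre _; rfl
  | cons x t ih =>
    intro pre h
    simp [fillRow, List.replicate_succ, if_neg (h x (by simp)),
      ih _ (fun y hy => h y (by simp [hy]))]

lemma fillRow_of_lt (all : List Int) (v : Int) :
    ∀ (row pre : List Int), (∀ x ∈ row, x < v) →
      fillRow all v pre row = rankRow all pre row := by
  intro row
  induction row with
  | nil => intro pre _; rfl
  | cons x t ih =>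
    intro pre h
    simp [fillRow, rankRow, if_pos (h x (by simp)), ih _ (fun y hy => h y (by simp [hy]))]

lemma fill_step (all row pre : List Int) (v p : Int) (a : List Int)
    (hp : p = 1 + (all.countP (fun y => decide (y < v)) : Int) + (pre.count v : Int))
    (ha : ∀ j : Nat, a[j]? =
      if row[j]? = some v then some (p + ((row.take j).count v : Int))
      else (fillRow all v pre row)[j]?) :
    a = fillRow all (v + 1) pre row := by
  apply List.ext_getElem?
  intro j
  rw [ha j, fillRow_getElem?, fillRow_getElem?]
  rcases hrj : row[j]? with _ | x
  · rw [if_neg (by simp [hrj])]; simp [hrj]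
  · by_cases hxv : x = v
    · subst hxv
      rw [if_pos rfl]
      simp only [hrj, Option.map_some]
      rw [if_pos (by omega)]
      simp only [rankVal, hp, List.count_append]
      push_cast; ring_nf
    · rw [if_neg (by simp [hrj]; intro h; first | exact hxv h | exact hxv h.symm)]
      simp only [hrj, Option.map_some]
      congr 1
      by_cases hlt : x < v
      · rw [if_pos hlt, if_pos (by omega)]
      · rw [if_neg hlt, if_neg (by omega)]

lemma threefold (r1 r2 r3 : List Int) (v : Int) (a b c : List Int) (p : Int) :
    (part 0 r1 v ++ part 1 r2 v ++ part 2 r3 v).foldl innerStep ([a, b, c], p) =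
      (fun S1 => (fun S2 => (fun S3 => ([S1.1, S2.1, S3.1], S3.2))
          ((posList v r3 0).foldl rowStep (c, S2.2)))
          ((posList v r2 0).foldl rowStep (b, S1.2)))
        ((posList v r1 0).foldl rowStep (a, p)) := by
  rw [List.foldl_append, List.foldl_append]
  rw [bridge0 _ (fst_mem_part 0 r1 v) a b c p, map_snd_part]
  rw [bridge1 _ (fst_mem_part 1 r2 v), map_snd_part]
  rw [bridge2 _ (fst_mem_part 2 r3 v), map_snd_part]

-- ---- A side: one step of the outer loop ----
lemma aStep_state (r1 r2 r3 : List Int) (L v : Int) :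
    aStep (aAdd 2 r3 (aAdd 1 r2 (aAdd 0 r1 (aInit L)))) (stateF r1 r2 r3 v) v =
      stateF r1 r2 r3 (v + 1) := by
  unfold aStep
  rw [getD_aDict, sorted_parts]
  show (part 0 r1 v ++ part 1 r2 v ++ part 2 r3 v).foldl innerStep (stateF r1 r2 r3 v) =
    stateF r1 r2 r3 (v + 1)
  unfold stateF
  rw [threefold]
  simp only []
  -- abbreviations
  obtain ⟨len1, snd1, get1⟩ := scatter v r1 0 (fillRow (r1 ++ r2 ++ r3) v [] r1)
      (1 + ((r1 ++ r2 ++ r3).countP (fun y => decide (y < v)) : Int))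
      (by rw [length_fillRow]; omega)
  simp only [Nat.cast_zero, Nat.sub_zero, Nat.zero_le, true_and] at len1 snd1 get1
  obtain ⟨len2, snd2, get2⟩ := scatter v r2 0 (fillRow (r1 ++ r2 ++ r3) v r1 r2)
      (((posList v r1 0).foldl rowStep (fillRow (r1 ++ r2 ++ r3) v [] r1,
         1 + ((r1 ++ r2 ++ r3).countP (fun y => decide (y < v)) : Int))).2)
      (by rw [length_fillRow]; omega)
  simp only [Nat.cast_zero, Nat.sub_zero, Nat.zero_le, true_and] at len2 snd2 get2
  obtain ⟨len3, snd3, get3⟩ := scatter v r3 0 (fillRow (r1 ++ r2 ++ r3) v (r1 ++ r2) r3)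
      (((posList v r2 0).foldl rowStep (fillRow (r1 ++ r2 ++ r3) v r1 r2,
         ((posList v r1 0).foldl rowStep (fillRow (r1 ++ r2 ++ r3) v [] r1,
           1 + ((r1 ++ r2 ++ r3).countP (fun y => decide (y < v)) : Int))).2)).2)
      (by rw [length_fillRow]; omega)
  simp only [Nat.cast_zero, Nat.sub_zero, Nat.zero_le, true_and] at len3 snd3 get3
  have e1 := fill_step (r1 ++ r2 ++ r3) r1 [] v _ _ (by simp) get1
  have e2 := fill_step (r1 ++ r2 ++ r3) r2 r1 v _ _ (by rw [snd1]) get2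
  have e3 := fill_step (r1 ++ r2 ++ r3) r3 (r1 ++ r2) v _ _
      (by rw [snd2, snd1]; simp [List.count_append]; push_cast; ring) get3
  have hsnd : (((posList v r3 0).foldl rowStep (fillRow (r1 ++ r2 ++ r3) v (r1 ++ r2) r3,
      ((posList v r2 0).foldl rowStep (fillRow (r1 ++ r2 ++ r3) v r1 r2,
        ((posList v r1 0).foldl rowStep (fillRow (r1 ++ r2 ++ r3) v [] r1,
          1 + ((r1 ++ r2 ++ r3).countP (fun y => decide (y < v)) : Int))).2)).2)).2) =
      1 + (((r1 ++ r2 ++ r3).countP (fun y => decide (y < v + 1))) : Int) := by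
    rw [snd3, snd2, snd1, countP_lt_succ]
    simp [List.count_append]
    push_cast; ring
  rw [e1, e2, e3, hsnd]

lemma loopA (r1 r2 r3 : List Int) (L : Int) :
    ∀ (n : Nat) (v : Int), v + n = L + 1 →
      (PySem.List.pyRange v (L + 1) 1).foldl
          (aStep (aAdd 2 r3 (aAdd 1 r2 (aAdd 0 r1 (aInit L))))) (stateF r1 r2 r3 v) =
        stateF r1 r2 r3 (L + 1) := by
  intro n
  induction n with
  | zero =>
    intro v hv
    have : v = L + 1 := by omega
    subst this
    rw [PySem.List.pyRange_one_eq_nil (by omega)]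
    rfl
  | succ n ih =>
    intro v hv
    rw [PySem.List.pyRange_one_cons (by omega), List.foldl_cons, aStep_state]
    exact ih (v + 1) (by omega)

lemma A_eq_rank (r1 r2 r3 : List Int) (L : Int) (hpre : Pre_standardize_rows r1 r2 r3 L) :
    standardize_rows r1 r2 r3 L =
      (rankRow (r1 ++ r2 ++ r3) [] r1,
       rankRow (r1 ++ r2 ++ r3) r1 r2,
       rankRow (r1 ++ r2 ++ r3) (r1 ++ r2) r3) := by
  unfold standardize_rows
  show (PySem.List.pyGetD ((PySem.List.pyRange 1 (L + 1) 1).foldl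
      (aStep (aAdd 2 r3 (aAdd 1 r2 (aAdd 0 r1 (aInit L)))))
      ([PySem.List.pyRepeat [(0 : Int)] (r1.length : Int),
        PySem.List.pyRepeat [(0 : Int)] (r2.length : Int),
        PySem.List.pyRepeat [(0 : Int)] (r3.length : Int)], 1)).1 0 [],
     PySem.List.pyGetD ((PySem.List.pyRange 1 (L + 1) 1).foldl
      (aStep (aAdd 2 r3 (aAdd 1 r2 (aAdd 0 r1 (aInit L)))))
      ([PySem.List.pyRepeat [(0 : Int)] (r1.length : Int),
        PySem.List.pyRepeat [(0 : Int)] (r2.length : Int),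
        PySem.List.pyRepeat [(0 : Int)] (r3.length : Int)], 1)).1 1 [],
     PySem.List.pyGetD ((PySem.List.pyRange 1 (L + 1) 1).foldl
      (aStep (aAdd 2 r3 (aAdd 1 r2 (aAdd 0 r1 (aInit L)))))
      ([PySem.List.pyRepeat [(0 : Int)] (r1.length : Int),
        PySem.List.pyRepeat [(0 : Int)] (r2.length : Int),
        PySem.List.pyRepeat [(0 : Int)] (r3.length : Int)], 1)).1 2 []) = _
  have hge1 : ∀ x ∈ r1 ++ r2 ++ r3, 1 ≤ x := fun x hx => (hpre x hx).1
  have hinit : ([PySem.List.pyRepeat [(0 : Int)] (r1.length : Int),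
      PySem.List.pyRepeat [(0 : Int)] (r2.length : Int),
      PySem.List.pyRepeat [(0 : Int)] (r3.length : Int)], (1 : Int)) = stateF r1 r2 r3 1 := by
    unfold stateF
    rw [PySem.List.pyRepeat_singleton, PySem.List.pyRepeat_singleton,
      PySem.List.pyRepeat_singleton]
    rw [fillRow_of_ge _ _ r1 [] (fun x hx => by have := hge1 x (by simp [hx]); omega),
        fillRow_of_ge _ _ r2 r1 (fun x hx => by have := hge1 x (by simp [hx]); omega),
        fillRow_of_ge _ _ r3 (r1 ++ r2) (fun x hx => by have := hge1 x (by simp [hx]); omega)]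
    have hz : (r1 ++ r2 ++ r3).countP (fun y => decide (y < 1)) = 0 :=
      List.countP_eq_zero.2 (fun x hx => by have := hge1 x hx; simp; omega)
    simp only [List.countP_append] at hz
    simp [List.countP_append]
    omega
  by_cases hL : 0 ≤ L
  · rw [hinit, loopA r1 r2 r3 L L.toNat 1 (by omega)]
    show (fillRow (r1 ++ r2 ++ r3) (L + 1) [] r1, fillRow (r1 ++ r2 ++ r3) (L + 1) r1 r2,
      fillRow (r1 ++ r2 ++ r3) (L + 1) (r1 ++ r2) r3) = _
    rw [fillRow_of_lt _ _ r1 [] (fun x hx => by have := hpre x (by simp [hx]); omega),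
        fillRow_of_lt _ _ r2 r1 (fun x hx => by have := hpre x (by simp [hx]); omega),
        fillRow_of_lt _ _ r3 (r1 ++ r2) (fun x hx => by have := hpre x (by simp [hx]); omega)]
  · have h1 : r1 = [] := List.eq_nil_iff_forall_not_mem.2
      (fun x hx => by have := hpre x (by simp [hx]); omega)
    have h2 : r2 = [] := List.eq_nil_iff_forall_not_mem.2
      (fun x hx => by have := hpre x (by simp [hx]); omega)
    have h3 : r3 = [] := List.eq_nil_iff_forall_not_mem.2
      (fun x hx => by have := hpre x (by simp [hx]); omega)
    subst h1; subst h2; subst h3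
    rw [PySem.List.pyRange_one_eq_nil (by omega), List.foldl_nil]
    rfl

-- ---- B side ----
lemma keys_insert_not_mem (d : PySem.Dict Int Int) (k v : Int) (hk : k ∉ d.keys) :
    (d.insert k v).keys = d.keys ++ [k] := by
  have hc : d.contains k = false := by
    rw [PySem.Dict.contains_eq_decide_mem_keys]; simp [hk]
  unfold PySem.Dict.insert
  rw [hc]
  simp [PySem.Dict.keys]

lemma keys_insert_mem (d : PySem.Dict Int Int) (k v : Int) (hk : k ∈ d.keys) :
    (d.insert k v).keys = d.keys := by
  have hc : d.contains k = true := by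
    rw [PySem.Dict.contains_eq_decide_mem_keys]; simp [hk]
  unfold PySem.Dict.insert
  rw [hc]
  simp only [eq_self_iff_true, if_true, PySem.Dict.keys, List.map_map]
  apply List.map_congr_left
  intro p _
  by_cases h : p.1 = k
  · simp [h]
  · simp [h]

lemma keys_foldl_insert_zero : ∀ (l : List Int) (d : PySem.Dict Int Int),
    (∀ i ∈ l, i ∉ d.keys) → l.Nodup →
    ((l.foldl (fun d i => d.insert i (0 : Int)) d).keys = d.keys ++ l) := by
  intro l
  induction l with
  | nil => intro d _ _; simp
  | cons i t ih =>
    intro d hni hnd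
    simp only [List.foldl_cons]
    rw [ih (d.insert i 0) ?_ hnd.of_cons,
        keys_insert_not_mem d i 0 (hni i List.mem_cons_self)]
    · simp
    · intro x hx
      rw [keys_insert_not_mem d i 0 (hni i List.mem_cons_self)]
      simp only [List.mem_append, List.mem_singleton]
      rintro (hxk | rfl)
      · exact hni x (List.mem_cons_of_mem _ hx) hxk
      · exact (List.nodup_cons.1 hnd).1 hx

lemma keys_empty : (PySem.Dict.empty : PySem.Dict Int Int).keys = [] := rfl

lemma keys_bSeed (L : Int) : (bSeed L).keys = PySem.List.pyRange 1 (L + 1) 1 := by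
  unfold bSeed
  rw [keys_foldl_insert_zero _ _ (fun i _ => by rw [keys_empty]; exact List.not_mem_nil)
      (PySem.List.nodup_pyRange_one 1 (L + 1)), keys_empty, List.nil_append]

lemma keys_foldl_count_mem : ∀ (l : List Int) (d : PySem.Dict Int Int),
    (∀ x ∈ l, x ∈ d.keys) →
    ((l.foldl (fun d v => d.insert v (d.getD v 0 + 1)) d).keys = d.keys) := by
  intro l
  induction l with
  | nil => intro d _; rfl
  | cons x t ih =>
    intro d hx
    simp only [List.foldl_cons]
    have hk := keys_insert_mem d x (d.getD x 0 + 1) (hx x List.mem_cons_self)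
    rw [ih _ (fun y hy => by rw [hk]; exact hx y (List.mem_cons_of_mem _ hy)), hk]

lemma getD_foldl_insert_zero (l : List Int) :
    ∀ (d : PySem.Dict Int Int) (v : Int), d.getD v 0 = 0 →
      ((l.foldl (fun d i => d.insert i (0 : Int)) d).getD v 0 = 0) := by
  induction l with
  | nil => intro d v h; simpa using h
  | cons i t ih =>
    intro d v h
    simp only [List.foldl_cons]
    exact ih _ v (by rw [PySem.Dict.getD_insert]; split <;> simp [h])

lemma getD_bSeed (L v : Int) : (bSeed L).getD v 0 = 0 :=
  getD_foldl_insert_zero _ _ v (PySem.Dict.getD_empty v 0)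

lemma bCnt_rows_eq (r1 r2 r3 : List Int) (L : Int) :
    bCnt [r1, r2, r3] L =
      (r1 ++ r2 ++ r3).foldl (fun d v => d.insert v (d.getD v 0 + 1)) (bSeed L) := by
  unfold bCnt
  simp [List.foldl_append]

lemma getD_bCnt (r1 r2 r3 : List Int) (L : Int) (v : Int) :
    (bCnt [r1, r2, r3] L).getD v 0 = (((r1 ++ r2 ++ r3).count v : Nat) : Int) := by
  rw [bCnt_rows_eq, PySem.Dict.getD_foldl_insert_add_one, getD_bSeed]
  simp

lemma keys_bCnt (r1 r2 r3 : List Int) (L : Int)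
    (hpre : Pre_standardize_rows r1 r2 r3 L) :
    (bCnt [r1, r2, r3] L).keys = PySem.List.pyRange 1 (L + 1) 1 := by
  rw [bCnt_rows_eq,
    keys_foldl_count_mem _ _ (fun x hx => by
      rw [keys_bSeed]
      have := hpre x hx
      exact (PySem.List.mem_pyRange_one).2 ⟨this.1, by omega⟩),
    keys_bSeed]

lemma countP_and_cons (l : List Int) (u v : Int) (rest : List Int)
    (hvu : v < u) (hvr : v ∉ rest) :
    l.countP (fun x => decide (x < u ∧ x ∈ v :: rest)) =
      l.count v + l.countP (fun x => decide (x < u ∧ x ∈ rest)) := by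
  induction l with
  | nil => rfl
  | cons x t ih =>
    rw [List.countP_cons, List.countP_cons, List.count_cons, ih]
    by_cases e2 : x = v
    · subst e2
      rw [if_pos (by simp [hvu]), if_pos (by simp), if_neg (by simp [hvr])]
      omega
    · by_cases e1 : x < u
      · by_cases e3 : x ∈ rest
        · rw [if_pos (by simp [e1, e3]), if_neg (by simp only [beq_iff_eq]; exact e2),
              if_pos (by simp [e1, e3])]
          omega
        · rw [if_neg (by simp [e2, e3]), if_neg (by simp only [beq_iff_eq]; exact e2),
              if_neg (by simp [e3])]
          omega
      · rw [if_neg (by simp [e1]), if_neg (by simp only [beq_iff_eq]; exact e2), if_neg (by simp [e1])]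
        omega

lemma less_fold (all : List Int) (cd : PySem.Dict Int Int)
    (hcd : ∀ v : Int, cd.getD v 0 = ((all.count v : Nat) : Int)) :
    ∀ (ks : List Int) (d : PySem.Dict Int Int) (acc : Int),
      ks.Pairwise (· < ·) →
      (∀ u ∈ ks, acc + (all.countP (fun x => decide (x < u ∧ x ∈ ks)) : Int) =
        (all.countP (fun x => decide (x < u)) : Int)) →
      (∀ u ∈ ks,
        ((ks.foldl (fun (st : PySem.Dict Int Int × Int) v =>
            (st.1.insert v st.2, st.2 + cd.getD v 0)) (d, acc)).1).getD u 0 =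
          (all.countP (fun x => decide (x < u)) : Int)) ∧
      (∀ w, w ∉ ks →
        ((ks.foldl (fun (st : PySem.Dict Int Int × Int) v =>
            (st.1.insert v st.2, st.2 + cd.getD v 0)) (d, acc)).1).getD w 0 =
          d.getD w 0) := by
  intro ks
  induction ks with
  | nil =>
    intro d acc _ _
    exact ⟨fun u hu => absurd hu (List.not_mem_nil), fun w _ => rfl⟩
  | cons v rest ih =>
    intro d acc hpair hhyp
    have hvrest : ∀ u ∈ rest, v < u := (List.pairwise_cons.1 hpair).1
    have hvnotin : v ∉ rest := fun h => lt_irrefl v (hvrest v h)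
    have hacc : acc = (all.countP (fun x => decide (x < v)) : Int) := by
      have h := hhyp v List.mem_cons_self
      have hzero : all.countP (fun x => decide (x < v ∧ x ∈ v :: rest)) = 0 :=
        List.countP_eq_zero.2 (fun x _ => by
          simp only [List.mem_cons, decide_eq_true_eq, not_and]
          rintro hlt (rfl | hmem)
          · omega
          · exact absurd hlt (by have := hvrest x hmem; omega))
      rw [hzero] at h
      simpa using h
    have hstep : ∀ u ∈ rest,
        (acc + cd.getD v 0) +
          (all.countP (fun x => decide (x < u ∧ x ∈ rest)) : Int) =
          (all.countP (fun x => decide (x < u)) : Int) := by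
      intro u hu
      have h := hhyp u (List.mem_cons_of_mem _ hu)
      rw [countP_and_cons all u v rest (hvrest u hu) hvnotin] at h
      rw [hcd v]
      push_cast at h ⊢
      omega
    simp only [List.foldl_cons]
    obtain ⟨ih1, ih2⟩ := ih (d.insert v acc) (acc + cd.getD v 0)
      (List.pairwise_cons.1 hpair).2 hstep
    constructor
    · intro u hu
      rcases List.mem_cons.1 hu with rfl | hu'
      · rw [ih2 u hvnotin, PySem.Dict.getD_insert, if_pos rfl, hacc]
      · exact ih1 u hu'
    · intro w hw
      rw [ih2 w (fun h => hw (List.mem_cons_of_mem _ h)),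
        PySem.Dict.getD_insert, if_neg (fun h => hw (by rw [h]; exact List.mem_cons_self))]

lemma bLess_getD (all : List Int) (L : Int) (cnt : PySem.Dict Int Int)
    (hkeys : cnt.keys = PySem.List.pyRange 1 (L + 1) 1)
    (hcd : ∀ v : Int, cnt.getD v 0 = ((all.count v : Nat) : Int))
    (hall : ∀ x ∈ all, 1 ≤ x ∧ x ≤ L)
    (x : Int) (hx : x ∈ all) :
    (bLess cnt).getD x 0 = (all.countP (fun y => decide (y < x)) : Int) := by
  unfold bLess
  rw [hkeys]
  refine (less_fold all cnt hcd _ PySem.Dict.empty 0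
    (PySem.List.pairwise_lt_pyRange_one 1 (L + 1)) ?_).1 x
    ((PySem.List.mem_pyRange_one).2 ⟨(hall x hx).1, by have := (hall x hx).2; omega⟩)
  intro u _
  have heq : all.countP (fun y => decide (y < u ∧ y ∈ PySem.List.pyRange 1 (L + 1) 1)) =
      all.countP (fun y => decide (y < u)) :=
    List.countP_congr (fun y hy => by
      have h := hall y hy
      have hy2 : y ∈ PySem.List.pyRange 1 (L + 1) 1 :=
        (PySem.List.mem_pyRange_one).2 ⟨h.1, by omega⟩
      simp [hy2])
  rw [heq]
  ring

lemma rowpass (all : List Int) (less : PySem.Dict Int Int)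
    (hless : ∀ x ∈ all, less.getD x 0 = (all.countP (fun y => decide (y < x)) : Int)) :
    ∀ (row pre : List Int) (seen : PySem.Dict Int Int) (cur : List Int),
      (∀ u, seen.getD u 0 = (pre.count u : Int)) → (∀ x ∈ row, x ∈ all) →
      (row.foldl (fun (st2 : PySem.Dict Int Int × List Int) v =>
          (st2.1.insert v (st2.1.getD v 0 + 1), st2.2 ++ [1 + less.getD v 0 + st2.1.getD v 0]))
        (seen, cur)).2 = cur ++ rankRow all pre row ∧
      ∀ u, ((row.foldl (fun (st2 : PySem.Dict Int Int × List Int) v =>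
          (st2.1.insert v (st2.1.getD v 0 + 1), st2.2 ++ [1 + less.getD v 0 + st2.1.getD v 0]))
        (seen, cur)).1).getD u 0 = ((pre ++ row).count u : Int) := by
  intro row
  induction row with
  | nil =>
    intro pre seen cur hseen _
    refine ⟨by simp [rankRow], ?_⟩
    intro u
    simpa using hseen u
  | cons x t ih =>
    intro pre seen cur hseen hmem
    simp only [List.foldl_cons]
    have hx : x ∈ all := hmem x List.mem_cons_self
    rw [hseen x, hless x hx]
    have hseen' : ∀ u, (seen.insert x ((pre.count x : Int) + 1)).getD u 0 =
        (((pre ++ [x]).count u : Nat) : Int) := by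
      intro u
      rw [PySem.Dict.getD_insert]
      by_cases hu : u = x
      · subst hu
        rw [if_pos rfl]
        simp [List.count_append]
      · rw [if_neg hu, hseen u]
        simp [List.count_append, List.count_cons]; omega
    obtain ⟨ih1, ih2⟩ := ih (pre ++ [x]) _ _ hseen'
      (fun y hy => hmem y (List.mem_cons_of_mem _ hy))
    constructor
    · rw [ih1]
      show cur ++ [rankVal all pre x] ++ rankRow all (pre ++ [x]) t =
        cur ++ rankRow all pre (x :: t)
      simp [rankRow, List.append_assoc]
    · intro u
      rw [ih2 u]
      simp [List.append_assoc]

lemma B_eq_rank (r1 r2 r3 : List Int) (L : Int)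
    (hpre : Pre_standardize_rows r1 r2 r3 L) :
    standardize_rows_alt r1 r2 r3 L =
      (rankRow (r1 ++ r2 ++ r3) [] r1,
       rankRow (r1 ++ r2 ++ r3) r1 r2,
       rankRow (r1 ++ r2 ++ r3) (r1 ++ r2) r3) := by
  have hl : ∀ x ∈ r1 ++ r2 ++ r3, (bLess (bCnt [r1, r2, r3] L)).getD x 0 =
      ((r1 ++ r2 ++ r3).countP (fun y => decide (y < x)) : Int) :=
    fun x hx => bLess_getD (r1 ++ r2 ++ r3) L _ (keys_bCnt r1 r2 r3 L hpre)
      (getD_bCnt r1 r2 r3 L) hpre x hx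
  have h0 : ∀ u : Int, (PySem.Dict.empty : PySem.Dict Int Int).getD u 0 =
      ((([] : List Int).count u : Nat) : Int) := by
    intro u; simp [PySem.Dict.getD_empty]
  obtain ⟨o1, s1⟩ := rowpass (r1 ++ r2 ++ r3) (bLess (bCnt [r1, r2, r3] L)) hl r1 []
    PySem.Dict.empty [] h0 (fun y hy => by simp [hy])
  obtain ⟨o2, s2⟩ := rowpass (r1 ++ r2 ++ r3) (bLess (bCnt [r1, r2, r3] L)) hl r2 r1
    (bRow (bLess (bCnt [r1, r2, r3] L)) PySem.Dict.empty r1).1 []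
    (fun u => by have := s1 u; simpa [bRow] using this) (fun y hy => by simp [hy])
  obtain ⟨o3, s3⟩ := rowpass (r1 ++ r2 ++ r3) (bLess (bCnt [r1, r2, r3] L)) hl r3 (r1 ++ r2)
    (bRow (bLess (bCnt [r1, r2, r3] L))
      (bRow (bLess (bCnt [r1, r2, r3] L)) PySem.Dict.empty r1).1 r2).1 []
    (fun u => by have := s2 u; simpa [bRow] using this) (fun y hy => by simp [hy])
  show (PySem.List.pyGetD
      ([] ++ [(bRow (bLess (bCnt [r1, r2, r3] L)) PySem.Dict.empty r1).2]
        ++ [(bRow (bLess (bCnt [r1, r2, r3] L))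
              (bRow (bLess (bCnt [r1, r2, r3] L)) PySem.Dict.empty r1).1 r2).2]
        ++ [(bRow (bLess (bCnt [r1, r2, r3] L))
              (bRow (bLess (bCnt [r1, r2, r3] L))
                (bRow (bLess (bCnt [r1, r2, r3] L)) PySem.Dict.empty r1).1 r2).1 r3).2])
      0 [],
    PySem.List.pyGetD
      ([] ++ [(bRow (bLess (bCnt [r1, r2, r3] L)) PySem.Dict.empty r1).2]
        ++ [(bRow (bLess (bCnt [r1, r2, r3] L))
              (bRow (bLess (bCnt [r1, r2, r3] L)) PySem.Dict.empty r1).1 r2).2]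
        ++ [(bRow (bLess (bCnt [r1, r2, r3] L))
              (bRow (bLess (bCnt [r1, r2, r3] L))
                (bRow (bLess (bCnt [r1, r2, r3] L)) PySem.Dict.empty r1).1 r2).1 r3).2])
      1 [],
    PySem.List.pyGetD
      ([] ++ [(bRow (bLess (bCnt [r1, r2, r3] L)) PySem.Dict.empty r1).2]
        ++ [(bRow (bLess (bCnt [r1, r2, r3] L))
              (bRow (bLess (bCnt [r1, r2, r3] L)) PySem.Dict.empty r1).1 r2).2]
        ++ [(bRow (bLess (bCnt [r1, r2, r3] L))
              (bRow (bLess (bCnt [r1, r2, r3] L))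
                (bRow (bLess (bCnt [r1, r2, r3] L)) PySem.Dict.empty r1).1 r2).1 r3).2])
      2 []) = _
  have e1 : (bRow (bLess (bCnt [r1, r2, r3] L)) PySem.Dict.empty r1).2 =
      rankRow (r1 ++ r2 ++ r3) [] r1 := by
    have := o1; simpa [bRow] using this
  have e2 : (bRow (bLess (bCnt [r1, r2, r3] L))
      (bRow (bLess (bCnt [r1, r2, r3] L)) PySem.Dict.empty r1).1 r2).2 =
      rankRow (r1 ++ r2 ++ r3) r1 r2 := by
    have := o2; simpa [bRow] using this
  have e3 : (bRow (bLess (bCnt [r1, r2, r3] L))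
      (bRow (bLess (bCnt [r1, r2, r3] L))
        (bRow (bLess (bCnt [r1, r2, r3] L)) PySem.Dict.empty r1).1 r2).1 r3).2 =
      rankRow (r1 ++ r2 ++ r3) (r1 ++ r2) r3 := by
    have := o3; simpa [bRow] using this
  rw [List.nil_append]
  show ((bRow (bLess (bCnt [r1, r2, r3] L)) PySem.Dict.empty r1).2,
    (bRow (bLess (bCnt [r1, r2, r3] L))
      (bRow (bLess (bCnt [r1, r2, r3] L)) PySem.Dict.empty r1).1 r2).2,
    (bRow (bLess (bCnt [r1, r2, r3] L))
      (bRow (bLess (bCnt [r1, r2, r3] L))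
        (bRow (bLess (bCnt [r1, r2, r3] L)) PySem.Dict.empty r1).1 r2).1 r3).2) = _
  rw [e1, e2, e3]

-- ===== VERDICT (by name: the statement is the Claim_ definition above) =====
theorem standardize_rows_spec : Claim_equal_standardize_rows := by
  intro r1 r2 r3 L _ hpre
  unfold Spec_standardize_rows
  rw [A_eq_rank r1 r2 r3 L hpre, B_eq_rank r1 r2 r3 L hpre]
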